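-- pv_equiv track=rewrite | github.com/theguyoverthere/CMU15-112-Spring17 | src/Week2/Lab/lab2.py | hasEveryDigit
-- ===== SOURCE A (Python) =====
-- def hasEveryDigit(n):
--     digit0Present = False
--     digit1Present = False
--     digit2Present = False
--     digit3Present = False
--     digit4Present = False
--     digit5Present = False
--     digit6Present = False
--     digit7Present = False
--     digit8Present = False
--     digit9Present = False
--
--     while n > 0:
--         nthDigit = n % 10
--         if   nthDigit == 0: digit0Present = True
--         elif nthDigit == 1: digit1Present = True
--         elif nthDigit == 2: digit2Present = True
--         elif nthDigit == 3: digit3Present = True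
--         elif nthDigit == 4: digit4Present = True
--         elif nthDigit == 5: digit5Present = True
--         elif nthDigit == 6: digit6Present = True
--         elif nthDigit == 7: digit7Present = True
--         elif nthDigit == 8: digit8Present = True
--         elif nthDigit == 9: digit9Present = True
--
--         n //= 10
--
--     return digit0Present and digit1Present and \
--            digit2Present and digit2Present and \
--            digit3Present and digit4Present and \
--            digit5Present and digit6Present and \
--            digit7Present and digit8Present and \
--            digit9Present
-- ===== SOURCE B (Python) =====
-- def hasEveryDigit(n):
--     return n > 0 and set("0123456789") <= set(str(n))
-- ===== Notes on version B (the rewrite author's own statement) =====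
-- stated objective: idiomatic
-- what changed: B has no digit-extraction loop at all: it converts the number to its decimal string and tests set('0123456789') <= set(str(n)), keeping the positivity guard that A's while-loop condition provides.
import Mathlib
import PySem

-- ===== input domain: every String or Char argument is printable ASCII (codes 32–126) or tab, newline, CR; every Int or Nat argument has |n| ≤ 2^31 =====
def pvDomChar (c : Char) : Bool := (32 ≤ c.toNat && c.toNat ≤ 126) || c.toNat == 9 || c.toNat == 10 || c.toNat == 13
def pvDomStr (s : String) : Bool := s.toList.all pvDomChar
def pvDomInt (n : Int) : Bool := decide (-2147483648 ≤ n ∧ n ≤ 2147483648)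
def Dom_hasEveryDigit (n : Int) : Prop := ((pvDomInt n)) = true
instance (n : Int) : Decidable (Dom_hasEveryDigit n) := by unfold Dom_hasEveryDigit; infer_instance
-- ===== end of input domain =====

-- B drops A's digit-extraction loop and ten flags: it tests set('0123456789') <= set(str(n)) on the decimal string, keeping the positivity guard of A's while-loop; same cost, idiomatic.

-- ===== PORT A =====
-- the while-loop of A, carrying its ten boolean flags; the elif chain's conditions are
-- mutually exclusive, so each flag update is written as its own 'if' on the same digit
def hasEveryDigitLoop (n : Int) (b0 b1 b2 b3 b4 b5 b6 b7 b8 b9 : Bool) : Bool :=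
  if _h : 0 < n then
    let d := PySem.Int.mod n 10
    hasEveryDigitLoop (PySem.Int.floordiv n 10)
      (if d = 0 then true else b0) (if d = 1 then true else b1)
      (if d = 2 then true else b2) (if d = 3 then true else b3)
      (if d = 4 then true else b4) (if d = 5 then true else b5)
      (if d = 6 then true else b6) (if d = 7 then true else b7)
      (if d = 8 then true else b8) (if d = 9 then true else b9)
  else
    -- A's return expression tests digit2Present twice (and every flag once)
    b0 && b1 && b2 && b2 && b3 && b4 && b5 && b6 && b7 && b8 && b9
termination_by n.toNat
decreasing_by
  rw [PySem.Int.floordiv_eq_ediv_of_pos (by omega : (0:Int) < 10)]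
  omega

def hasEveryDigit (n : Int) : Bool :=
  hasEveryDigitLoop n false false false false false false false false false false

-- ===== PORT B =====
-- 'n > 0 and set("0123456789") <= set(str(n))'; the set-inclusion 's <= t' is
-- 'every member of s is a member of t', written as .all over the PySem.Set
def hasEveryDigit_alt (n : Int) : Bool :=
  decide (0 < n) &&
    (PySem.Set.ofList "0123456789".toList).all
      (fun c => (PySem.Set.ofList (PySem.Int.toChars n)).contains c)

-- ===== PRECONDITION & SPEC =====
def Spec_hasEveryDigit (n : Int) (out : Bool) : Prop := out = hasEveryDigit_alt n
instance (n : Int) (out : Bool) : Decidable (Spec_hasEveryDigit n out) := by unfold Spec_hasEveryDigit; infer_instance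

-- ===== CLAIM (what is proved, stated in full; the proofs are below) =====
def Claim_equal_hasEveryDigit : Prop := ∀ (n : Int), Dom_hasEveryDigit n → Spec_hasEveryDigit n (hasEveryDigit n)

-- ===== LEMMAS AND PROOFS =====

-- Nat.digitChar is injective below 10
lemma digitChar_inj : ∀ a < 10, ∀ b < 10, Nat.digitChar a = Nat.digitChar b → a = b := by decide

-- core's toDigitsCore, for positive input and enough fuel, renders Nat.digits reversed
lemma toDigitsCore_eq (fuel : Nat) : ∀ (m : Nat) (acc : List Char), 0 < m → m < fuel →
    Nat.toDigitsCore 10 fuel m acc = ((Nat.digits 10 m).map Nat.digitChar).reverse ++ acc := by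
  induction fuel with
  | zero => intro m acc hm hf; omega
  | succ fuel ih =>
    intro m acc hm hf
    rw [Nat.toDigitsCore]
    rw [Nat.digits_def' (by norm_num : 1 < 10) hm]
    by_cases h : m / 10 = 0
    · simp only [h]
      rw [Nat.digits_zero]
      simp
    · simp only [h, if_false]
      rw [ih (m / 10) _ (Nat.pos_of_ne_zero h) (by omega)]
      rw [Nat.digits_def' (by norm_num : 1 < 10) (Nat.pos_of_ne_zero h)] at *
      simp

-- membership in str(m)'s characters is membership among m's decimal digits
lemma mem_toDigits (m : Nat) (hm : 0 < m) (d : Nat) (hd : d < 10) :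
    (Nat.digitChar d ∈ Nat.toDigits 10 m) ↔ d ∈ Nat.digits 10 m := by
  rw [Nat.toDigits, toDigitsCore_eq (m + 1) m [] hm (by omega)]
  simp only [List.append_nil, List.mem_reverse, List.mem_map]
  constructor
  · rintro ⟨x, hx, hxe⟩
    have hx10 : x < 10 := Nat.digits_lt_base (by norm_num) hx
    rwa [digitChar_inj x hx10 d hd hxe] at hx
  · intro h; exact ⟨d, h, rfl⟩

-- one flag update of A's elif chain, folded into the digits of m
lemma flag_step (m i : Nat) (b : Bool) (hm : 0 < m) :
    ((if ((m % 10 : Nat) : Int) = (i : Int) then true else b) ||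
      decide (i ∈ Nat.digits 10 (m / 10))) = (b || decide (i ∈ Nat.digits 10 m)) := by
  rw [Nat.digits_def' (by norm_num : 1 < 10) hm]
  by_cases h : m % 10 = i
  · simp [h]
  · have h' : ¬ (((m % 10 : Nat) : Int) = (i : Int)) := by exact_mod_cast h
    have h'' : (i ∈ m % 10 :: Nat.digits 10 (m / 10)) ↔ i ∈ Nat.digits 10 (m / 10) := by
      simp [List.mem_cons, Ne.symm h]
    rw [if_neg h']
    simp only [h'']

-- loop invariant: each flag of A's loop ends up as 'flag OR this digit occurs in n'
lemma loopA : ∀ (m : Nat) (b0 b1 b2 b3 b4 b5 b6 b7 b8 b9 : Bool),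
    hasEveryDigitLoop (m : Int) b0 b1 b2 b3 b4 b5 b6 b7 b8 b9 =
      ((b0 || decide (0 ∈ Nat.digits 10 m)) && (b1 || decide (1 ∈ Nat.digits 10 m)) &&
       (b2 || decide (2 ∈ Nat.digits 10 m)) && (b2 || decide (2 ∈ Nat.digits 10 m)) &&
       (b3 || decide (3 ∈ Nat.digits 10 m)) && (b4 || decide (4 ∈ Nat.digits 10 m)) &&
       (b5 || decide (5 ∈ Nat.digits 10 m)) && (b6 || decide (6 ∈ Nat.digits 10 m)) &&
       (b7 || decide (7 ∈ Nat.digits 10 m)) && (b8 || decide (8 ∈ Nat.digits 10 m)) &&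
       (b9 || decide (9 ∈ Nat.digits 10 m))) := by
  intro m
  induction m using Nat.strong_induction_on with
  | _ m ih =>
    intro b0 b1 b2 b3 b4 b5 b6 b7 b8 b9
    by_cases hm : 0 < m
    · rw [hasEveryDigitLoop, dif_pos (by exact_mod_cast hm : (0:Int) < (m : Int))]
      have hmod : PySem.Int.mod (m : Int) 10 = ((m % 10 : Nat) : Int) := by
        exact_mod_cast PySem.Int.mod_natCast m 10
      have hdiv : PySem.Int.floordiv (m : Int) 10 = ((m / 10 : Nat) : Int) := by
        exact_mod_cast PySem.Int.floordiv_natCast m 10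
      rw [hmod, hdiv, ih (m / 10) (Nat.div_lt_self hm (by norm_num)) _ _ _ _ _ _ _ _ _ _]
      have e0 := flag_step m 0 b0 hm; have e1 := flag_step m 1 b1 hm
      have e2 := flag_step m 2 b2 hm; have e3 := flag_step m 3 b3 hm
      have e4 := flag_step m 4 b4 hm; have e5 := flag_step m 5 b5 hm
      have e6 := flag_step m 6 b6 hm; have e7 := flag_step m 7 b7 hm
      have e8 := flag_step m 8 b8 hm; have e9 := flag_step m 9 b9 hm
      simp only [Nat.cast_zero] at e0
      simp only [Nat.cast_one] at e1
      simp only [Nat.cast_ofNat] at e2 e3 e4 e5 e6 e7 e8 e9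
      rw [e0, e1, e2, e3, e4, e5, e6, e7, e8, e9]
    · have hm0 : m = 0 := by omega
      subst hm0
      rw [hasEveryDigitLoop, dif_neg (by norm_num : ¬ ((0:Int) < ((0:Nat) : Int)))]
      simp

-- ===== VERDICT (by name: the statement is the Claim_ definition above) =====
theorem hasEveryDigit_spec : Claim_equal_hasEveryDigit := by
  intro n _
  show hasEveryDigit n = hasEveryDigit_alt n
  unfold hasEveryDigit hasEveryDigit_alt
  by_cases hn : 0 < n
  · have hcast : n = ((n.toNat : Nat) : Int) := by omega
    have hm : 0 < n.toNat := by omega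
    rw [hcast, loopA]
    have htc : PySem.Int.toChars ((n.toNat : Nat) : Int) = Nat.toDigits 10 n.toNat := by
      simp only [PySem.Int.toChars]
      rw [if_neg (by omega : ¬ ((n.toNat : Nat) : Int) < 0), Int.toNat_natCast]
    rw [htc, decide_eq_true (show (0:Int) < ((n.toNat : Nat) : Int) by exact_mod_cast hm)]
    have hset : PySem.Set.ofList "0123456789".toList =
        ['0','1','2','3','4','5','6','7','8','9'] := by decide
    rw [hset]
    have g : ∀ d : Nat, d < 10 →
        (PySem.Set.ofList (Nat.toDigits 10 n.toNat)).contains (Nat.digitChar d) =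
          decide (d ∈ Nat.digits 10 n.toNat) := by
      intro d hd
      rw [Bool.eq_iff_iff]
      simp only [PySem.Set.contains_eq_listContains, List.contains_eq_mem, PySem.Set.mem_ofList, decide_eq_true_eq]
      exact mem_toDigits n.toNat hm d hd
    have g0 := g 0 (by norm_num); have g1 := g 1 (by norm_num)
    have g2 := g 2 (by norm_num); have g3 := g 3 (by norm_num)
    have g4 := g 4 (by norm_num); have g5 := g 5 (by norm_num)
    have g6 := g 6 (by norm_num); have g7 := g 7 (by norm_num)
    have g8 := g 8 (by norm_num); have g9 := g 9 (by norm_num)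
    rw [show Nat.digitChar 0 = '0' from rfl] at g0
    rw [show Nat.digitChar 1 = '1' from rfl] at g1
    rw [show Nat.digitChar 2 = '2' from rfl] at g2
    rw [show Nat.digitChar 3 = '3' from rfl] at g3
    rw [show Nat.digitChar 4 = '4' from rfl] at g4
    rw [show Nat.digitChar 5 = '5' from rfl] at g5
    rw [show Nat.digitChar 6 = '6' from rfl] at g6
    rw [show Nat.digitChar 7 = '7' from rfl] at g7
    rw [show Nat.digitChar 8 = '8' from rfl] at g8
    rw [show Nat.digitChar 9 = '9' from rfl] at g9
    simp only [List.all_cons, List.all_nil, g0, g1, g2, g3, g4, g5, g6, g7, g8, g9]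
    simp [Bool.and_assoc]
  · rw [hasEveryDigitLoop, dif_neg hn, decide_eq_false hn]
    simp
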